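-- pv_equiv track=rewrite | github.com/Netflix-Skunkworks/service-capacity-modeling | service_capacity_modeling/models/org/netflix/partition_capacity.py | _interesting_ppn_values
-- ===== SOURCE A (Python) =====
-- import math
--
-- def _interesting_ppn_values(n_partitions: int, max_ppn: int) -> list[tuple[int, int]]:
--     """Compute PPn values where base_nodes changes.
--
--     WHY THIS OPTIMIZATION IS VALID
--     ------------------------------
--     The utility function depends on (node_count, availability, cost) where:
--         node_count = max(2, base_nodes × rf)
--         availability = f(node_count, rf, n_partitions)
--         cost = node_count × cost_per_node
--
--     Notice: utility depends on base_nodes, not PPn directly. So if two PPn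
--     values give the same base_nodes, they produce identical utility scores.
--
--     We only need to check one PPn per unique base_nodes. We pick the MAXIMUM
--     PPn for each base_nodes since that's the most space-efficient disk usage.
--
--     HOW IT WORKS
--     ------------
--     Given: base_nodes = ceil(n_partitions / ppn)
--
--     For each target base_nodes from 1 to n_partitions, find the range of PPn
--     values that produce it:
--         ceil(n/ppn) = b  ⟹  b-1 < n/ppn ≤ b  ⟹  n/b ≤ ppn < n/(b-1)
--
--     We take the maximum PPn in that range (capped by max_ppn).
--
--     EXAMPLE
--     -------
--     For n_partitions=12, max_ppn=100:
--         [(12, 1), (6, 2), (4, 3), (3, 4), (2, 6), (1, 12)]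
--
--     Only 6 values to check instead of 100. For n_partitions=12, max_ppn=20000,
--     we still only check 6 values - a 3333x reduction in search space.
--     """
--     results = []
--     seen_base_nodes = set()
--
--     # For each possible base_nodes, find the max ppn that gives it
--     # ceil(n/ppn) = b  means  b-1 < n/ppn <= b  means  n/b <= ppn < n/(b-1)
--     # So max ppn for base_nodes=b is: min(max_ppn, floor(n/(b-1)) - 1) if b > 1
--     #                                 or max_ppn if b == 1
--     for base_nodes in range(1, n_partitions + 1):
--         if base_nodes == 1:
--             # ppn >= n_partitions gives base_nodes=1
--             # Use min to cap at n_partitions (exact fit is most efficient)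
--             ppn = min(max_ppn, n_partitions)
--         else:
--             # Max ppn where ceil(n/ppn) = base_nodes
--             # ppn must satisfy: n/base_nodes <= ppn < n/(base_nodes-1)
--             min_ppn_for_base = math.ceil(n_partitions / base_nodes)
--             max_ppn_for_base = math.ceil(n_partitions / (base_nodes - 1)) - 1
--
--             if max_ppn_for_base < min_ppn_for_base:
--                 continue  # No valid ppn for this base_nodes
--             if min_ppn_for_base > max_ppn:
--                 continue  # All valid ppn values exceed max_ppn
--
--             # Use the max valid ppn (capped by max_ppn)
--             ppn = min(max_ppn_for_base, max_ppn)
--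
--         # Verify (sanity check)
--         actual_base = math.ceil(n_partitions / ppn)
--         if actual_base != base_nodes:
--             continue
--
--         if base_nodes in seen_base_nodes:
--             continue
--         seen_base_nodes.add(base_nodes)
--         results.append((ppn, base_nodes))
--
--     # Sort by descending ppn (highest ppn = lowest base_nodes first)
--     results.sort(key=lambda x: -x[0])
--     return results
-- ===== SOURCE B (Python) =====
-- def _interesting_ppn_values(n_partitions: int, max_ppn: int) -> list[tuple[int, int]]:
--     """Divisor-jump enumeration of the distinct ceil(n/ppn) blocks.
--
--     Walk ppn downward from min(max_ppn, n_partitions); each step emits the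
--     current ppn (the largest reachable one for its base_nodes value) and jumps
--     directly to just below the smallest ppn of the same block, so only one ppn
--     per distinct base_nodes is visited (O(sqrt(n)) steps instead of O(n)).
--     The list is produced already in descending-ppn order, so no sort is needed.
--     """
--     results = []
--     ppn = min(max_ppn, n_partitions)
--     while ppn >= 1:
--         base_nodes = -(-n_partitions // ppn)  # ceil(n/ppn)
--         results.append((ppn, base_nodes))
--         # smallest ppn with the same base_nodes is ceil(n/base_nodes); jump below it
--         ppn = -(-n_partitions // base_nodes) - 1
--     return results
-- ===== Notes on version B (the rewrite author's own statement) =====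
-- stated objective: faster
-- what changed: Replace A's O(n_partitions) scan over every candidate base_nodes (plus a final sort) with a divisor-jump walk that visits only the O(sqrt(n)) distinct ceil(n/ppn) blocks, emitting the entries already in descending-ppn order.
import Mathlib
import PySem

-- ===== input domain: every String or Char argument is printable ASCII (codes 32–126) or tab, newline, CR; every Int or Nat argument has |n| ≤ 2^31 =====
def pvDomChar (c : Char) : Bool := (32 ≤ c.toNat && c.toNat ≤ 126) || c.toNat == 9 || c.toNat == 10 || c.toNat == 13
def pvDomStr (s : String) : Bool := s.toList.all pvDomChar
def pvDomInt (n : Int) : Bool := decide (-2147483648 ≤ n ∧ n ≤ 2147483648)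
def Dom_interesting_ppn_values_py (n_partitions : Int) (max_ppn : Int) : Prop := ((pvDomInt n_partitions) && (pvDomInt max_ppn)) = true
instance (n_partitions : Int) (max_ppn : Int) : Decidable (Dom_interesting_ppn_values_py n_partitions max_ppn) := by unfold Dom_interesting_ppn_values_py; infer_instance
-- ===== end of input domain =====

-- B is the divisor-jump enumeration of the distinct ceil(n/ppn) blocks: O(sqrt n) steps
-- instead of A's scan over all n base_nodes candidates, and no final sort.

-- ===== PORT A =====
-- Shared helper: ceiling division ceil(a/b) as -((-a)//b).  A computes math.ceil(a/b) with
-- float division; for |a| ≤ 2^31 (the stated Dom) that float ceiling equals this exact one.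
def pvCeil (a b : Int) : Int := -(PySem.Int.floordiv (-a) b)

-- one iteration of A's `for base_nodes in range(1, n_partitions+1)` loop;
-- `continue` is modelled by the Option being none / the sanity & seen checks returning st unchanged
def pvABody (n mp : Int) (st : List (Int × Int) × PySem.Set Int) (b : Int) :
    List (Int × Int) × PySem.Set Int :=
  let pOpt : Option Int :=
    if b = 1 then
      some (min mp n)
    else
      let min_ppn_for_base := pvCeil n b
      let max_ppn_for_base := pvCeil n (b - 1) - 1
      if max_ppn_for_base < min_ppn_for_base then none
      else if min_ppn_for_base > mp then none
      else some (min max_ppn_for_base mp)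
  match pOpt with
  | none => st
  | some ppn =>
    if pvCeil n ppn ≠ b then st
    else if PySem.Set.contains st.2 b then st
    else (st.1 ++ [(ppn, b)], PySem.Set.add st.2 b)

def interesting_ppn_values_py (n_partitions : Int) (max_ppn : Int) : List (Int × Int) :=
  let st := (PySem.List.pyRange 1 (n_partitions + 1) 1).foldl
      (pvABody n_partitions max_ppn) ([], PySem.Set.empty)
  PySem.List.sorted st.1 (fun x => -x.1)

-- ===== PORT B =====
-- the `while ppn >= 1` loop of Source B; fuel = the initial ppn suffices because ppn strictly decreases
def pvBloop (n : Int) : Nat → Int → List (Int × Int)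
  | 0, _ => []
  | fuel + 1, ppn =>
    if 1 ≤ ppn then
      let base_nodes := pvCeil n ppn
      (ppn, base_nodes) :: pvBloop n fuel (pvCeil n base_nodes - 1)
    else []

def interesting_ppn_values_py_alt (n_partitions : Int) (max_ppn : Int) : List (Int × Int) :=
  pvBloop n_partitions (min max_ppn n_partitions).toNat (min max_ppn n_partitions)

-- ===== PRECONDITION & SPEC =====
-- Pre_ excludes exactly the inputs where A raises ZeroDivisionError: n_partitions ≥ 1 with
-- max_ppn = 0 (the base_nodes = 1 iteration then divides by ppn = min(0, n) = 0).
def Pre_interesting_ppn_values_py (n_partitions : Int) (max_ppn : Int) : Prop :=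
  ¬ (1 ≤ n_partitions ∧ max_ppn = 0)
instance (n_partitions : Int) (max_ppn : Int) : Decidable (Pre_interesting_ppn_values_py n_partitions max_ppn) := by unfold Pre_interesting_ppn_values_py; infer_instance

def pvWitness_interesting_ppn_values_py : Int × Int := (12, 100)

def Spec_interesting_ppn_values_py (n_partitions : Int) (max_ppn : Int) (out : List (Int × Int)) : Prop := out = interesting_ppn_values_py_alt n_partitions max_ppn
instance (n_partitions : Int) (max_ppn : Int) (out : List (Int × Int)) : Decidable (Spec_interesting_ppn_values_py n_partitions max_ppn out) := by unfold Spec_interesting_ppn_values_py; infer_instance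

-- ===== CLAIM (what is proved, stated in full; the proofs are below) =====
def Claim_equal_interesting_ppn_values_py : Prop := ∀ (n_partitions : Int) (max_ppn : Int), Dom_interesting_ppn_values_py n_partitions max_ppn → Pre_interesting_ppn_values_py n_partitions max_ppn → Spec_interesting_ppn_values_py n_partitions max_ppn (interesting_ppn_values_py n_partitions max_ppn)

-- ===== LEMMAS AND PROOFS =====

-- ceiling-division brackets: with C := pvCeil n q and 0 < q we have (C-1)*q < n ≤ C*q
theorem pvCeil_char (n q : Int) (hq : 0 < q) :
    (pvCeil n q - 1) * q < n ∧ n ≤ pvCeil n q * q :=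
  (PySem.Int.neg_floordiv_neg_eq_iff_of_pos hq).mp rfl

theorem pvCeil_le_iff (n q k : Int) (hq : 0 < q) : pvCeil n q ≤ k ↔ n ≤ k * q := by
  obtain ⟨h1, h2⟩ := pvCeil_char n q hq
  constructor
  · intro h; nlinarith
  · intro h; by_contra hc; push Not at hc; nlinarith

theorem pvCeil_lt_iff (n q k : Int) (hq : 0 < q) : k < pvCeil n q ↔ k * q < n := by
  have := pvCeil_le_iff n q k hq
  constructor <;> intro h <;> by_contra hc <;> push Not at hc <;> omega

theorem pvCeil_pos (n q : Int) (hn : 1 ≤ n) (hq : 0 < q) : 1 ≤ pvCeil n q := by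
  have := (pvCeil_lt_iff n q 0 hq).mpr (by omega)
  omega

theorem pvCeil_le_n (n q : Int) (hn : 1 ≤ n) (hq : 0 < q) : pvCeil n q ≤ n := by
  rw [pvCeil_le_iff n q n hq]; nlinarith

theorem pvCeil_one (n : Int) : pvCeil n 1 = n := by
  have h1 := (pvCeil_le_iff n 1 n (by omega)).mpr (by omega)
  have h2 := (pvCeil_lt_iff n 1 (n - 1) (by omega)).mpr (by omega)
  omega

theorem pvCeil_self (n : Int) (hn : 1 ≤ n) : pvCeil n n = 1 := by
  have h1 := (pvCeil_le_iff n n 1 (by omega)).mpr (by omega)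
  have h2 := pvCeil_pos n n hn (by omega)
  omega

-- a block with a witness point maps back: if pvCeil n q = b then pvCeil n (pvCeil n b) = b
theorem pvCeil_image (n q : Int) (hn : 1 ≤ n) (hq : 0 < q) :
    pvCeil n (pvCeil n (pvCeil n q)) = pvCeil n q := by
  have h1 := pvCeil_char n q hq
  have hb : 1 ≤ pvCeil n q := pvCeil_pos n q hn hq
  have h2 := pvCeil_char n (pvCeil n q) (by omega)
  have hLq : pvCeil n (pvCeil n q) ≤ q := (pvCeil_le_iff n (pvCeil n q) q (by omega)).mpr (by nlinarith)
  have hL1 : 1 ≤ pvCeil n (pvCeil n q) := pvCeil_pos n (pvCeil n q) hn (by omega)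
  have hle : pvCeil n (pvCeil n (pvCeil n q)) ≤ pvCeil n q :=
    (pvCeil_le_iff n (pvCeil n (pvCeil n q)) (pvCeil n q) (by omega)).mpr (by nlinarith)
  have hgt : pvCeil n q - 1 < pvCeil n (pvCeil n (pvCeil n q)) :=
    (pvCeil_lt_iff n (pvCeil n (pvCeil n q)) (pvCeil n q - 1) (by omega)).mpr (by nlinarith)
  omega

-- negative divisor gives a nonpositive ceiling (n ≥ 1)
theorem pvCeil_nonpos (n q : Int) (hn : 1 ≤ n) (hq : q < 0) : pvCeil n q ≤ 0 := by
  have hmul := PySem.Int.floordiv_mul_add_mod (-n) q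
  have hmod := PySem.Int.mod_neg_bounds (a := -n) hq
  unfold pvCeil
  by_contra hc
  push Not at hc
  nlinarith

-- pvG: what A's loop body appends for a single b (the seen-set never fires, see pvFold_eq)
def pvG (n mp : Int) (b : Int) : Option (Int × Int) :=
  let pOpt : Option Int :=
    if b = 1 then
      some (min mp n)
    else
      let min_ppn_for_base := pvCeil n b
      let max_ppn_for_base := pvCeil n (b - 1) - 1
      if max_ppn_for_base < min_ppn_for_base then none
      else if min_ppn_for_base > mp then none
      else some (min max_ppn_for_base mp)
  match pOpt with
  | none => none
  | some ppn => if pvCeil n ppn ≠ b then none else some (ppn, b)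

-- one loop iteration on a not-yet-seen b appends exactly pvG's entry
theorem pvABody_step (n mp : Int) (acc : List (Int × Int)) (s : PySem.Set Int) (b : Int)
    (hb : b ∉ s) :
    pvABody n mp (acc, s) b
      = match pvG n mp b with
        | none => (acc, s)
        | some e => (acc ++ [e], PySem.Set.add s b) := by
  have hc : PySem.Set.contains s b = false := by
    simp [PySem.Set.contains]; exact hb
  simp only [pvABody, pvG]
  split
  · split <;> simp_all
  · split <;> simp_all

theorem pvFold_eq (n mp : Int) :
    ∀ (l : List Int) (acc : List (Int × Int)) (s : PySem.Set Int),
      l.Nodup → (∀ b ∈ l, b ∉ s) →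
      ((l.foldl (pvABody n mp) (acc, s)).1 = acc ++ l.filterMap (pvG n mp)) := by
  intro l
  induction l with
  | nil => intro acc s _ _; simp
  | cons b t ih =>
    intro acc s hnd hs
    have hb : b ∉ s := hs b (by simp)
    rw [List.foldl_cons, pvABody_step n mp acc s b hb]
    rcases hg : pvG n mp b with _ | e
    · rw [List.filterMap_cons_none hg, ih acc s hnd.of_cons (fun x hx => hs x (by simp [hx]))]
    · rw [List.filterMap_cons_some hg,
        ih (acc ++ [e]) (PySem.Set.add s b) hnd.of_cons ?_]
      · simp
      · intro x hx
        rw [PySem.Set.mem_add]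
        rintro (h1 | rfl)
        · exact hs x (by simp [hx]) h1
        · exact (List.nodup_cons.mp hnd).1 hx

-- the jump loop's entries all have first component ≤ the current ppn, and strictly decrease
theorem pvBloop_bounds (n : Int) (hn : 1 ≤ n) :
    ∀ (fuel : Nat) (p : Int),
      (∀ x ∈ pvBloop n fuel p, x.1 ≤ p) ∧
      (pvBloop n fuel p).Pairwise (fun a b => b.1 < a.1) := by
  intro fuel
  induction fuel with
  | zero => intro p; simp [pvBloop]
  | succ f ih =>
    intro p
    by_cases hp : 1 ≤ p
    · have hb1 : 1 ≤ pvCeil n p := pvCeil_pos n p hn (by omega)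
      have hch := pvCeil_char n p (by omega)
      have hnext : pvCeil n (pvCeil n p) ≤ p :=
        (pvCeil_le_iff n (pvCeil n p) p (by omega)).mpr (by nlinarith)
      obtain ⟨ihm, ihp⟩ := ih (pvCeil n (pvCeil n p) - 1)
      simp only [pvBloop, if_pos hp]
      constructor
      · intro x hx
        rcases List.mem_cons.mp hx with rfl | hx
        · simp
        · have := ihm x hx; omega
      · exact List.pairwise_cons.mpr ⟨fun y hy => by have := ihm y hy; simp; omega, ihp⟩
    · simp [pvBloop, hp]

-- main correspondence: from a block boundary p (everything above p is in blocks ≤ C n (p+1)),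
-- the jump loop from p produces exactly A's surviving entries for base_nodes > C n (p+1)
theorem pvJ (n mp : Int) (hn : 1 ≤ n) :
    ∀ (fuel : Nat) (p : Int), 0 ≤ p → p ≤ mp → p.toNat ≤ fuel →
      pvCeil n (p + 1) * p < n →
      pvBloop n fuel p
        = List.filterMap (pvG n mp) (PySem.List.pyRange (pvCeil n (p + 1) + 1) (n + 1) 1) := by
  intro fuel
  induction fuel with
  | zero =>
    intro p h0 _ hft _
    have hp0 : p = 0 := by omega
    subst hp0
    rw [show (0 : Int) + 1 = 1 by ring, pvCeil_one n,
      PySem.List.pyRange_one_eq_nil (by omega)]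
    simp [pvBloop]
  | succ f ih =>
    intro p h0 hpmp hft Hp
    by_cases hp : 1 ≤ p
    · -- current block head b1 := pvCeil n p, previous boundary b0 := pvCeil n (p+1)
      have hb0 : 1 ≤ pvCeil n (p + 1) := pvCeil_pos n (p + 1) hn (by omega)
      have hb1 : 1 ≤ pvCeil n p := pvCeil_pos n p hn (by omega)
      have hch := pvCeil_char n p (by omega)
      have hch1 := pvCeil_char n (p + 1) (by omega)
      have hb0b1 : pvCeil n (p + 1) < pvCeil n p := by nlinarith
      have hb1n : pvCeil n p ≤ n := pvCeil_le_n n p hn (by omega)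
      -- A's loop skips every base_nodes strictly between the two boundaries
      have hmid : ∀ b ∈ PySem.List.pyRange (pvCeil n (p + 1) + 1) (pvCeil n p) 1,
          pvG n mp b = none := by
        intro b hbmem
        rw [PySem.List.mem_pyRange_one] at hbmem
        have hbne1 : ¬ b = 1 := by omega
        have hempty : pvCeil n (b - 1) - 1 < pvCeil n b := by
          by_contra hc
          push Not at hc
          have hq1 : 1 ≤ pvCeil n b := pvCeil_pos n b hn (by omega)
          have hupper : n ≤ b * pvCeil n b := by
            have := (pvCeil_char n b (by omega)).2; nlinarith
          have hlow : pvCeil n b * (b - 1) < n :=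
            (pvCeil_lt_iff n (b - 1) (pvCeil n b) (by omega)).mp (by omega)
          have hqch := pvCeil_char n (pvCeil n b) (by omega)
          rcases le_or_gt (pvCeil n b) p with hle | hgt
          · have h1 : pvCeil n p ≤ pvCeil n (pvCeil n b) :=
              (pvCeil_le_iff n p (pvCeil n (pvCeil n b)) (by omega)).mpr (by nlinarith)
            have h2 : pvCeil n (pvCeil n b) ≤ b :=
              (pvCeil_le_iff n (pvCeil n b) b (by omega)).mpr (by nlinarith)
            omega
          · have h1 : pvCeil n (pvCeil n b) ≤ pvCeil n (p + 1) :=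
              (pvCeil_le_iff n (pvCeil n b) (pvCeil n (p + 1)) (by omega)).mpr (by nlinarith)
            have h2 : b - 1 < pvCeil n (pvCeil n b) :=
              (pvCeil_lt_iff n (pvCeil n b) (b - 1) (by omega)).mpr (by nlinarith)
            omega
        unfold pvG
        rw [if_neg hbne1]
        simp only [if_pos hempty]
      -- A's entry at b1 itself is exactly (p, b1)
      have hminb : pvCeil n (pvCeil n p) ≤ p :=
        (pvCeil_le_iff n (pvCeil n p) p (by omega)).mpr (by nlinarith)
      have hmaxlo : p < pvCeil n (pvCeil n p - 1) :=
        (pvCeil_lt_iff n (pvCeil n p - 1) p (by omega)).mpr (by nlinarith)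
      have hmaxhi : pvCeil n (pvCeil n p - 1) ≤ p + 1 :=
        (pvCeil_le_iff n (pvCeil n p - 1) (p + 1) (by omega)).mpr (by nlinarith)
      have hGb1 : pvG n mp (pvCeil n p) = some (p, pvCeil n p) := by
        unfold pvG
        rw [if_neg (by omega : ¬ pvCeil n p = 1)]
        rw [if_neg (by omega : ¬ (pvCeil n (pvCeil n p - 1) - 1 < pvCeil n (pvCeil n p)))]
        rw [if_neg (by omega : ¬ (pvCeil n (pvCeil n p) > mp))]
        have hminpm : min (pvCeil n (pvCeil n p - 1) - 1) mp = p := by omega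
        rw [hminpm]
        simp
      -- image fact for the recursive boundary
      have himg : pvCeil n (pvCeil n (pvCeil n p)) = pvCeil n p := pvCeil_image n p hn (by omega)
      have hL1 : 1 ≤ pvCeil n (pvCeil n p) := pvCeil_pos n (pvCeil n p) hn (by omega)
      have hchb1 := pvCeil_char n (pvCeil n p) (by omega)
      -- apply the induction hypothesis at p' = pvCeil n (pvCeil n p) - 1
      have hrec := ih (pvCeil n (pvCeil n p) - 1) (by omega) (by omega) (by omega)
        (by rw [show pvCeil n (pvCeil n p) - 1 + 1 = pvCeil n (pvCeil n p) by ring, himg]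
            nlinarith)
      rw [show pvCeil n (pvCeil n p) - 1 + 1 = pvCeil n (pvCeil n p) by ring, himg] at hrec
      -- unfold one step of the loop and split A's range at the two boundaries
      rw [PySem.List.pyRange_one_append (pvCeil n (p + 1) + 1) (pvCeil n p) (n + 1)
        (by omega) (by omega)]
      rw [PySem.List.pyRange_one_cons (by omega : pvCeil n p < n + 1)]
      rw [List.filterMap_append, List.filterMap_eq_nil_iff.mpr hmid,
        List.filterMap_cons_some hGb1]
      simp only [pvBloop, if_pos hp, List.nil_append]
      rw [hrec]
    · -- p = 0: loop is finished and no base_nodes above pvCeil n 1 = n survives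
      have hp0 : p = 0 := by omega
      subst hp0
      rw [show (0 : Int) + 1 = 1 by ring, pvCeil_one n,
        PySem.List.pyRange_one_eq_nil (by omega)]
      simp [pvBloop]

-- ===== VERDICT (by name: the statement is the Claim_ definition above) =====
-- A's fold (seen-set and all) is the filterMap of pvG over the whole range
theorem pvA_filterMap (n mp : Int) :
    interesting_ppn_values_py n mp
      = PySem.List.sorted
          (List.filterMap (pvG n mp) (PySem.List.pyRange 1 (n + 1) 1)) (fun x => -x.1) := by
  show PySem.List.sorted
      ((PySem.List.pyRange 1 (n + 1) 1).foldl (pvABody n mp) ([], PySem.Set.empty)).1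
      (fun x => -x.1) = _
  rw [pvFold_eq n mp _ [] PySem.Set.empty (PySem.List.nodup_pyRange_one 1 (n + 1))
    (by intro b _ hb; simp [PySem.Set.empty] at hb)]
  simp

-- the filterMap equals B's jump loop (n ≥ 1, mp ≥ 1)
theorem pvMain (n mp : Int) (hn : 1 ≤ n) (hmp : 1 ≤ mp) :
    List.filterMap (pvG n mp) (PySem.List.pyRange 1 (n + 1) 1)
      = interesting_ppn_values_py_alt n mp := by
  unfold interesting_ppn_values_py_alt
  rw [PySem.List.pyRange_one_cons (by omega : (1 : Int) < n + 1)]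
  rcases le_or_gt n mp with hge | hlt
  · -- max_ppn ≥ n: first entry is (n, 1), tail starts the jump at n - 1
    have hmin : min mp n = n := min_eq_right hge
    have hG1 : pvG n mp 1 = some (n, 1) := by
      unfold pvG
      rw [if_pos rfl, hmin]
      simp [pvCeil_self n hn]
    obtain ⟨k, hk⟩ : ∃ k, (min mp n).toNat = k + 1 := ⟨(min mp n).toNat - 1, by omega⟩
    rw [List.filterMap_cons_some hG1, hk, hmin]
    simp only [pvBloop, if_pos (by omega : (1 : Int) ≤ n), pvCeil_self n hn, pvCeil_one n]
    have hrec := pvJ n mp hn k (n - 1) (by omega) (by omega) (by omega)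
      (by rw [show n - 1 + 1 = n by ring, pvCeil_self n hn]; omega)
    rw [show n - 1 + 1 = n by ring, pvCeil_self n hn] at hrec
    rw [hrec]
  · -- max_ppn < n: base_nodes = 1 is skipped; first surviving entry is (mp, pvCeil n mp)
    have hmin : min mp n = mp := min_eq_left (by omega)
    have hchm := pvCeil_char n mp (by omega)
    have hb0two : 2 ≤ pvCeil n mp := by
      have := (pvCeil_lt_iff n mp 1 (by omega)).mpr (by nlinarith)
      omega
    have hb0n : pvCeil n mp ≤ n := pvCeil_le_n n mp hn (by omega)
    have hG1 : pvG n mp 1 = none := by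
      unfold pvG
      rw [if_pos rfl, hmin]
      simp only [if_pos (show pvCeil n mp ≠ 1 by omega)]
    rw [List.filterMap_cons_none hG1, show (1 : Int) + 1 = 2 by norm_num]
    -- split the remaining range at b0 := pvCeil n mp
    rw [PySem.List.pyRange_one_append 2 (pvCeil n mp) (n + 1) (by omega) (by omega)]
    rw [PySem.List.pyRange_one_cons (by omega : pvCeil n mp < n + 1)]
    have hmid : ∀ b ∈ PySem.List.pyRange 2 (pvCeil n mp) 1, pvG n mp b = none := by
      intro b hbmem
      rw [PySem.List.mem_pyRange_one] at hbmem
      have hgt : mp < pvCeil n b :=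
        (pvCeil_lt_iff n b mp (by omega)).mpr (by nlinarith)
      unfold pvG
      rw [if_neg (by omega : ¬ b = 1)]
      by_cases h1 : pvCeil n (b - 1) - 1 < pvCeil n b
      · simp only [if_pos h1]
      · simp only [if_neg h1, if_pos (by omega : pvCeil n b > mp)]
    have hminble : pvCeil n (pvCeil n mp) ≤ mp :=
      (pvCeil_le_iff n (pvCeil n mp) mp (by omega)).mpr (by nlinarith)
    have hmaxge : mp < pvCeil n (pvCeil n mp - 1) :=
      (pvCeil_lt_iff n (pvCeil n mp - 1) mp (by omega)).mpr (by nlinarith)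
    have hGb0 : pvG n mp (pvCeil n mp) = some (mp, pvCeil n mp) := by
      unfold pvG
      rw [if_neg (by omega : ¬ pvCeil n mp = 1)]
      rw [if_neg (by omega : ¬ (pvCeil n (pvCeil n mp - 1) - 1 < pvCeil n (pvCeil n mp)))]
      rw [if_neg (by omega : ¬ (pvCeil n (pvCeil n mp) > mp))]
      rw [min_eq_right (by omega : mp ≤ pvCeil n (pvCeil n mp - 1) - 1)]
      simp
    rw [List.filterMap_append, List.filterMap_eq_nil_iff.mpr hmid,
      List.filterMap_cons_some hGb0, List.nil_append]
    -- B's first step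
    obtain ⟨k, hk⟩ : ∃ k, (min mp n).toNat = k + 1 := ⟨(min mp n).toNat - 1, by omega⟩
    rw [hk, hmin]
    simp only [pvBloop, if_pos (by omega : (1 : Int) ≤ mp)]
    -- recursion from p' = pvCeil n (pvCeil n mp) - 1
    have himg : pvCeil n (pvCeil n (pvCeil n mp)) = pvCeil n mp := pvCeil_image n mp hn (by omega)
    have hL1 : 1 ≤ pvCeil n (pvCeil n mp) := pvCeil_pos n (pvCeil n mp) hn (by omega)
    have hchb0 := pvCeil_char n (pvCeil n mp) (by omega)
    have hrec := pvJ n mp hn k (pvCeil n (pvCeil n mp) - 1) (by omega) (by omega) (by omega)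
      (by rw [show pvCeil n (pvCeil n mp) - 1 + 1 = pvCeil n (pvCeil n mp) by ring, himg]
          nlinarith)
    rw [show pvCeil n (pvCeil n mp) - 1 + 1 = pvCeil n (pvCeil n mp) by ring, himg] at hrec
    rw [hrec]

-- ===== VERDICT (by name: the statement is the Claim_ definition above) =====
theorem interesting_ppn_values_py_spec : Claim_equal_interesting_ppn_values_py := by
  intro n mp _ hpre
  unfold Spec_interesting_ppn_values_py
  by_cases hn : 1 ≤ n
  · by_cases hmp : 1 ≤ mp
    · rw [pvA_filterMap, pvMain n mp hn hmp]
      apply PySem.List.sorted_eq_of_perm_of_pairwise_lt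
      · exact List.Perm.refl _
      · exact ((pvBloop_bounds n hn _ _).2).imp (by intro a b h; simp; omega)
    · -- mp ≤ 0; Pre_ rules out mp = 0, so mp < 0 and both sides are empty
      have hmpneg : mp < 0 := by
        unfold Pre_interesting_ppn_values_py at hpre
        omega
      have hall : ∀ b ∈ PySem.List.pyRange 1 (n + 1) 1, pvG n mp b = none := by
        intro b hbmem
        rw [PySem.List.mem_pyRange_one] at hbmem
        by_cases hb1 : b = 1
        · subst hb1
          unfold pvG
          rw [if_pos rfl, min_eq_left (by omega : mp ≤ n)]
          have := pvCeil_nonpos n mp hn hmpneg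
          simp only [if_pos (show pvCeil n mp ≠ 1 by omega)]
        · have hgt : mp < pvCeil n b := by
            have := pvCeil_pos n b hn (by omega)
            omega
          unfold pvG
          rw [if_neg hb1]
          by_cases h1 : pvCeil n (b - 1) - 1 < pvCeil n b
          · simp only [if_pos h1]
          · simp only [if_neg h1, if_pos (by omega : pvCeil n b > mp)]
      rw [pvA_filterMap, List.filterMap_eq_nil_iff.mpr hall]
      unfold interesting_ppn_values_py_alt
      rw [show (min mp n).toNat = 0 by omega]
      rfl
  · -- n ≤ 0: A's range is empty and B's start ppn is below 1
    unfold interesting_ppn_values_py interesting_ppn_values_py_alt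
    rw [PySem.List.pyRange_one_eq_nil (by omega : n + 1 ≤ 1),
      show (min mp n).toNat = 0 by omega]
    rfl
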